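-- pv_equiv track=rewrite | github.com/ckadelka/AttractorCoherence | analyze_data_attractor_coherence.py | running_min
-- ===== SOURCE A (Python) =====
-- def running_min(data):
--     running_mins = []
--     minimum = data[-1]
--     for num in data[::-1]:
--         if num<minimum:
--             minimum = num
--         running_mins.append(minimum)
--     return running_mins[::-1]
-- ===== SOURCE B (Python) =====
-- def running_min(data):
--     return [min(data[i:]) for i in range(len(data))]
-- ===== Notes on version B (the rewrite author's own statement) =====
-- stated objective: alternative
-- what changed: Replaces A's single reverse-accumulating pass (running minimum carried through data[::-1], appended, result reversed back) by the direct definition: for each index i an independent full scan min(data[i:]), i.e. repeated slicing with no accumulator and no reversals.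
import Mathlib
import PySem

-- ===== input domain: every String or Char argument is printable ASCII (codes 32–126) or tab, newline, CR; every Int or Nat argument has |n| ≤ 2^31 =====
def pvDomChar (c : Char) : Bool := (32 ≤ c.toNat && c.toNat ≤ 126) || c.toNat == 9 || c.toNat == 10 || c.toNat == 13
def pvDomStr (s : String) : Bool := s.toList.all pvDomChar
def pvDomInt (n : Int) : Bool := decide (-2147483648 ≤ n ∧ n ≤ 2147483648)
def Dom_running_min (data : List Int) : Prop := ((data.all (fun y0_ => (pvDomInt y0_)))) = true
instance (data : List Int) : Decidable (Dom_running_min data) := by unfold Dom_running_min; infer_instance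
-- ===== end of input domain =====

-- B computes each suffix minimum independently as min(data[i:]) for every index (repeated full scans),
-- instead of A's reverse + accumulating running-minimum pass + reverse; objective: alternative.

-- ===== PORT A =====
def running_min (data : List Int) : List Int :=
  match PySem.List.pyGet? data (-1) with
  | none => []   -- Python raises IndexError here (last-element access on an empty list); excluded by Pre_running_min
  | some m0 =>
      -- data[::-1] is data.reverse (PySem.List.slice?_none_none_neg_one)
      let st := data.reverse.foldl
        (fun (st : List Int × Int) num =>
          let minimum := if num < st.2 then num else st.2
          (st.1 ++ [minimum], minimum)) (([] : List Int), m0)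
      st.1.reverse

-- ===== PORT B =====
-- [min(data[i:]) for i in range(len(data))]: the comprehension is a map over pyRange;
-- data[i:] is PySem.List.slice with no stop; min(xs) is PySem.List.min? with the identity key —
-- inside the range the slice is nonempty, so the .getD 0 default of min? is unreachable.
def running_min_alt (data : List Int) : List Int :=
  (PySem.List.pyRange 0 (data.length : Int) 1).map
    (fun i => (PySem.List.min? (PySem.List.slice data (some i) none) (fun x => x)).getD 0)

-- ===== PRECONDITION & SPEC =====
-- Pre_ excludes exactly the empty list, on which A raises IndexError at its initial last-element access.
def Pre_running_min (data : List Int) : Prop := data ≠ []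
instance (data : List Int) : Decidable (Pre_running_min data) := by unfold Pre_running_min; infer_instance
def pvWitness_running_min : List Int := [3, 1, 2]

def Spec_running_min (data : List Int) (out : List Int) : Prop := out = running_min_alt data
instance (data : List Int) (out : List Int) : Decidable (Spec_running_min data out) := by unfold Spec_running_min; infer_instance

-- ===== CLAIM (what is proved, stated in full; the proofs are below) =====
def Claim_equal_running_min : Prop := ∀ (data : List Int), Dom_running_min data → Pre_running_min data → Spec_running_min data (running_min data)

-- ===== LEMMAS AND PROOFS =====

-- the list of suffix minima (the common value of both ports)
def sufmins : List Int → List Int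
  | [] => []
  | x :: xs => xs.foldl min x :: sufmins xs

-- A's running minimum stream, seeded with m
def scanMin (m : Int) : List Int → List Int
  | [] => []
  | x :: xs => min m x :: scanMin (min m x) xs

-- A's stream over each suffix, seeded with m
def sufminsSeed (m : Int) : List Int → List Int
  | [] => []
  | x :: xs => ((x :: xs).foldl min m) :: sufminsSeed m xs

lemma foldl_min_pull (l : List Int) (a b : Int) :
    l.foldl min (min a b) = min a (l.foldl min b) := by
  induction l generalizing b with
  | nil => simp
  | cons c l ih => simp [List.foldl, min_assoc, ih]

lemma foldl_min_reverse (l : List Int) (a : Int) :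
    l.reverse.foldl min a = l.foldl min a := by
  induction l generalizing a with
  | nil => rfl
  | cons x xs ih =>
      simp only [List.reverse_cons, List.foldl_append, List.foldl, ih]
      rw [min_comm a x, foldl_min_pull, min_comm]

lemma loopA (l : List Int) (acc : List Int) (m : Int) :
    l.foldl
      (fun (st : List Int × Int) num =>
        let minimum := if num < st.2 then num else st.2
        (st.1 ++ [minimum], minimum)) (acc, m)
      = (acc ++ scanMin m l, l.foldl min m) := by
  induction l generalizing acc m with
  | nil => simp [scanMin]
  | cons x xs ih =>
      have hmin : (if x < m then x else m) = min m x := by omega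
      simp only [List.foldl, hmin, ih, scanMin]
      simp [min_comm]

lemma scanMin_append (l1 l2 : List Int) (m : Int) :
    scanMin m (l1 ++ l2) = scanMin m l1 ++ scanMin (l1.foldl min m) l2 := by
  induction l1 generalizing m with
  | nil => simp [scanMin]
  | cons x xs ih => simp [scanMin, ih, List.foldl, min_comm]

lemma scan_reverse (l : List Int) (m : Int) :
    (scanMin m l.reverse).reverse = sufminsSeed m l := by
  induction l generalizing m with
  | nil => rfl
  | cons x xs ih =>
      have h : min (xs.foldl min m) x = xs.foldl min (min m x) := by
        rw [min_comm m x, foldl_min_pull, min_comm]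
      rw [List.reverse_cons, scanMin_append, foldl_min_reverse, List.reverse_append]
      simp only [scanMin, List.reverse_cons, List.reverse_nil, List.nil_append,
        List.singleton_append, sufminsSeed, List.foldl]
      rw [ih, h]

lemma seed_last (l : List Int) (x : Int) :
    sufminsSeed x (l ++ [x]) = sufmins (l ++ [x]) := by
  induction l with
  | nil => simp [sufminsSeed, sufmins, List.foldl]
  | cons y l ih =>
      simp only [List.cons_append, sufminsSeed, sufmins, ih, List.foldl]
      congr 1
      rw [List.foldl_append, List.foldl_append, foldl_min_pull]
      simp only [List.foldl]
      omega

lemma seed_getLast (l : List Int) (h : l ≠ []) :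
    sufminsSeed (l.getLast h) l = sufmins l := by
  obtain ⟨l', x, rfl⟩ := List.eq_nil_or_concat l |>.resolve_left h
  simp only [List.concat_eq_append, List.getLast_append]
  exact seed_last l' x

lemma a_eq_sufmins (data : List Int) (h : data ≠ []) :
    running_min data = sufmins data := by
  unfold running_min
  simp only [PySem.List.pyGet?_neg_one, List.getLast?_eq_some_getLast h, loopA, List.nil_append]
  rw [scan_reverse, seed_getLast data h]

lemma map_minD_range (data : List Int) :
    (List.range data.length).map
      (fun k => (PySem.List.min? (data.drop k) (fun x => x)).getD 0) = sufmins data := by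
  induction data with
  | nil => rfl
  | cons x xs ih =>
      rw [List.length_cons, List.range_succ_eq_map]
      simp only [List.map_cons, List.map_map, List.drop_zero]
      rw [PySem.List.min?_id_cons]
      simpa [sufmins] using congrArg (List.cons (xs.foldl min x)) ih

lemma b_eq_sufmins (data : List Int) :
    running_min_alt data = sufmins data := by
  unfold running_min_alt
  rw [PySem.List.pyRange_one, List.map_map]
  rw [show ((data.length : Int) - 0).toNat = data.length by simp]
  rw [← map_minD_range data]
  refine List.map_congr_left ?_
  intro k _
  simp [Function.comp, PySem.List.slice_from_natCast]

-- ===== VERDICT (by name: the statement is the Claim_ definition above) =====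
theorem running_min_spec : Claim_equal_running_min := by
  intro data _ hpre
  unfold Spec_running_min
  rw [a_eq_sufmins data hpre, b_eq_sufmins]
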